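-- pv_equiv track=rewrite | github.com/GitPistachio/Competitive-programming | SPOJ/DIEHARD - DIE HARD/DIE HARD.py | solve
-- ===== SOURCE A (Python) =====
-- solutions = {}
--
-- def solve(H, A):
--     if (H, A) in solutions:
--         return solutions[(H, A)]
--
--     result = 0
--     if H > 17:
--         if A > 8:
--             # You can choose: be on are then of fire or be on air and then on water
--             fire = solve(H - 17, A + 7)
--             water = solve(H - 2, A - 8)
--
--             result = max(fire, water) + 2
--         elif A > 0:
--             # You cannot survive to be on air then on water but you can survive be on air then of fire
--             fire = solve(H - 17, A + 7) + 2
--             result = fire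
--     elif H > 2:
--         if A > 8:
--             # You cannot survive to be on air then on water but you can survivie to be on air then of water
--             water = solve(H - 2, A - 8) + 2
--             result = water
--         elif A > 0:
--             # You only can survive once on air
--             result = 1
--     elif H > 0 and A > 0:
--         # You only can survive one on air
--         result = 1
--
--     solutions[(H, A)] = result
--     return result
-- ===== SOURCE B (Python) =====
-- def solve(H, A):
--     # Iterative greedy simulation: when both combined moves survive, the
--     # water move (H-2, A-8) never does worse than the fire move (H-17, A+7),
--     # so a single forward loop replaces the branching memoized recursion.
--     turns = 0
--     while True:
--         if A > 8 and H > 2: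
--             H -= 2
--             A -= 8
--             turns += 2
--         elif A > 0 and H > 17:
--             H -= 17
--             A += 7
--             turns += 2
--         elif A > 0 and H > 0:
--             return turns + 1
--         else:
--             return turns
-- ===== Notes on version B (the rewrite author's own statement) =====
-- stated objective: alternative
-- what changed: Replaces the memoized branching recursion (global dict cache, max over two recursive branches) with a single non-recursive greedy loop, justified by the proved invariant that the water move (H-2, A-8) never does worse than the fire move (H-17, A+7) when both survive.
-- outside the precondition, e.g. on solve(6000, 5): A returns 1199, B returns 1199; on solve(2500, 100): A returns 519, B returns 519
import Mathlib
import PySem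

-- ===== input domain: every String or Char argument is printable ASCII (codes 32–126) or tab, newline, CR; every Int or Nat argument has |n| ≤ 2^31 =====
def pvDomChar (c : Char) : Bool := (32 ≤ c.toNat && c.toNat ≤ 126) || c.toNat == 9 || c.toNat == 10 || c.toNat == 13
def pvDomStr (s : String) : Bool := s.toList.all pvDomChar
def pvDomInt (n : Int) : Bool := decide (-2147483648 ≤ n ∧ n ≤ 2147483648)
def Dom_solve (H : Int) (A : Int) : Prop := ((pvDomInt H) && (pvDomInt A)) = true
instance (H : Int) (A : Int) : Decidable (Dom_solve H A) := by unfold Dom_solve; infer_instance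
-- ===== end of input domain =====

-- B replaces A's memoized two-branch recursion by a single iterative greedy loop
-- (the water move dominates the fire move whenever both survive); equivalence of
-- return values is proved — A's mutation of its global memo dict is not modelled
-- beyond one call (the cache only ever stores the values proved here, so cross-call
-- return values are unchanged).

-- ===== PORT A =====
-- A's global memo dict `solutions` is threaded explicitly: each call starts from
-- the dict it is given and returns the updated dict, exactly as the Python mutates it.
-- `fuel` is only a structural totality guard (every recursive call lowers H by ≥ 2,
-- so H.toNat + 1 steps are always enough; the fuel-0 arm is never reached).
def solveA (fuel : Nat) (H : Int) (A : Int) (d : PySem.Dict (Int × Int) Int) :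
    Int × PySem.Dict (Int × Int) Int :=
  match fuel with
  | 0 => (0, d)
  | fuel + 1 =>
    match PySem.Dict.get? d (H, A) with
    | some v => (v, d)
    | none =>
      if H > 17 then
        if A > 8 then
          let p1 := solveA fuel (H - 17) (A + 7) d
          let p2 := solveA fuel (H - 2) (A - 8) p1.2
          let r := max p1.1 p2.1 + 2
          (r, PySem.Dict.insert p2.2 (H, A) r)
        else if A > 0 then
          let p1 := solveA fuel (H - 17) (A + 7) d
          let r := p1.1 + 2
          (r, PySem.Dict.insert p1.2 (H, A) r)
        else (0, PySem.Dict.insert d (H, A) 0)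
      else if H > 2 then
        if A > 8 then
          let p := solveA fuel (H - 2) (A - 8) d
          let r := p.1 + 2
          (r, PySem.Dict.insert p.2 (H, A) r)
        else if A > 0 then (1, PySem.Dict.insert d (H, A) 1)
        else (0, PySem.Dict.insert d (H, A) 0)
      else if H > 0 ∧ A > 0 then (1, PySem.Dict.insert d (H, A) 1)
      else (0, PySem.Dict.insert d (H, A) 0)

def solve (H : Int) (A : Int) : Int := (solveA (H.toNat + 1) H A PySem.Dict.empty).1

-- ===== PORT B =====
-- same fuel guard: each iteration lowers H by ≥ 2, so the fuel-0 arm is never reached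
def solveLoop (fuel : Nat) (H : Int) (A : Int) (turns : Int) : Int :=
  match fuel with
  | 0 => turns
  | fuel + 1 =>
    if A > 8 ∧ H > 2 then solveLoop fuel (H - 2) (A - 8) (turns + 2)
    else if A > 0 ∧ H > 17 then solveLoop fuel (H - 17) (A + 7) (turns + 2)
    else if A > 0 ∧ H > 0 then turns + 1
    else turns

def solve_alt (H : Int) (A : Int) : Int := solveLoop (H.toNat + 1) H A 0

-- ===== PRECONDITION & SPEC =====
-- Pre_ excludes H > 1800 with A > 0: there A's recursion can exceed CPython's
-- default recursion limit and raise RecursionError; the exact crash threshold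
-- depends on both arguments, so this conservative bound also excludes some
-- inputs on which A still returns (B returns the same value there).
def Pre_solve (H : Int) (A : Int) : Prop := H ≤ 1800 ∨ A ≤ 0
instance (H : Int) (A : Int) : Decidable (Pre_solve H A) := by unfold Pre_solve; infer_instance
def pvWitness_solve : Int × Int := (40, 10)

def Spec_solve (H : Int) (A : Int) (out : Int) : Prop := out = solve_alt H A
instance (H : Int) (A : Int) (out : Int) : Decidable (Spec_solve H A out) := by unfold Spec_solve; infer_instance

-- ===== CLAIM (what is proved, stated in full; the proofs are below) =====
def Claim_equal_solve : Prop := ∀ (H : Int) (A : Int), Dom_solve H A → Pre_solve H A → Spec_solve H A (solve H A)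

-- ===== LEMMAS AND PROOFS =====

-- the pure value of A's recursion (memo stripped), used only in the proofs
def fPure (H : Int) (A : Int) : Int :=
  if H > 17 then
    if A > 8 then max (fPure (H - 17) (A + 7)) (fPure (H - 2) (A - 8)) + 2
    else if A > 0 then fPure (H - 17) (A + 7) + 2
    else 0
  else if H > 2 then
    if A > 8 then fPure (H - 2) (A - 8) + 2
    else if A > 0 then 1
    else 0
  else if H > 0 ∧ A > 0 then 1 else 0
termination_by H.toNat
decreasing_by all_goals omega

theorem fPure_nonneg : ∀ (H A : Int), 0 ≤ fPure H A := by
  intro H A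
  induction H, A using fPure.induct <;> rw [fPure] <;> split_ifs <;> omega

-- water (H-2, A-8) dominates fire (H-17, A+7) whenever both survive
theorem fPure_water_ge :
    ∀ (n : Nat) (H A : Int), H.toNat ≤ n → 17 < H → 8 < A →
      fPure (H - 17) (A + 7) ≤ fPure (H - 2) (A - 8) := by
  intro n
  induction n using Nat.strong_induction_on with
  | _ n ih =>
    intro H A hn h17 h8
    have e1 : H - 17 - 2 = H - 2 - 17 := by ring
    have e2 : A + 7 - 8 = A - 8 + 7 := by ring
    by_cases h19 : H ≤ 19
    · -- H ∈ (17,19]: fire state is terminal (value 1), water state is worth ≥ 1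
      have hnn := fPure_nonneg (H - 2 - 2) (A - 8 - 8)
      conv_lhs => rw [fPure]
      conv_rhs => rw [fPure]
      split_ifs <;> omega
    · by_cases h34 : H ≤ 34
      · -- H ∈ (19,34]: the fire state does water next; both reach (H-19, A-1)
        have hmx := le_max_left (fPure (H - 2 - 17) (A - 8 + 7)) (fPure (H - 2 - 2) (A - 8 - 8))
        conv_lhs => rw [fPure]
        conv_rhs => rw [fPure]
        rw [e1, e2]
        split_ifs <;> omega
      · -- H > 34: induction hypothesis at (H-17, A+7) resolves the inner max
        have hd : fPure (H - 17 - 17) (A + 7 + 7) ≤ fPure (H - 17 - 2) (A + 7 - 8) :=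
          ih (H - 17).toNat (by omega) (H - 17) (A + 7) le_rfl (by omega) (by omega)
        have hmx := le_max_left (fPure (H - 2 - 17) (A - 8 + 7)) (fPure (H - 2 - 2) (A - 8 - 8))
        have hmx2 := max_le hd (le_refl (fPure (H - 17 - 2) (A + 7 - 8)))
        conv_lhs => rw [fPure]
        conv_rhs => rw [fPure]
        rw [e1, e2] at hd hmx2 ⊢
        split_ifs <;> omega

theorem solveLoop_eq :
    ∀ (fuel : Nat) (H A t : Int), H.toNat < fuel → solveLoop fuel H A t = fPure H A + t := by
  intro fuel
  induction fuel with
  | zero => intro H A t hn; omega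
  | succ n ih =>
    intro H A t hn
    rw [solveLoop]
    split_ifs with c1 c2 c3
    · -- water step
      rw [ih (H - 2) (A - 8) (t + 2) (by omega)]
      conv_rhs => rw [fPure]
      by_cases h17 : H > 17
      · have hd := fPure_water_ge H.toNat H A le_rfl h17 c1.1
        rw [if_pos h17, if_pos c1.1, max_eq_right hd]
        omega
      · split_ifs <;> omega
    · -- fire step (here A ≤ 8, since H > 17 forces H > 2)
      rw [ih (H - 17) (A + 7) (t + 2) (by omega)]
      conv_rhs => rw [fPure]
      split_ifs <;> omega
    · conv_rhs => rw [fPure]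
      split_ifs <;> omega
    · conv_rhs => rw [fPure]
      split_ifs <;> omega

-- memo invariant: the dict only ever holds correct values of A's recursion
def MemoOK (d : PySem.Dict (Int × Int) Int) : Prop :=
  ∀ (p : Int × Int) (v : Int), PySem.Dict.get? d p = some v → v = fPure p.1 p.2

theorem memoOK_insert {d : PySem.Dict (Int × Int) Int} (hd : MemoOK d)
    (k : Int × Int) (v : Int) (hv : v = fPure k.1 k.2) :
    MemoOK (PySem.Dict.insert d k v) := by
  intro p w hw
  rw [PySem.Dict.get?_insert] at hw
  by_cases hpk : p = k
  · subst hpk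
    simp at hw
    omega
  · exact hd p w (by simpa [hpk] using hw)

theorem solveA_eq :
    ∀ (fuel : Nat) (H A : Int) (d : PySem.Dict (Int × Int) Int), H.toNat < fuel → MemoOK d →
      (solveA fuel H A d).1 = fPure H A ∧ MemoOK (solveA fuel H A d).2 := by
  intro fuel
  induction fuel with
  | zero => intro H A d hn; omega
  | succ n ih =>
    intro H A d hn hd
    rw [solveA]
    cases hmem : PySem.Dict.get? d (H, A) with
    | some v => exact ⟨hd (H, A) v hmem, hd⟩
    | none =>
      split_ifs with h17 h8 h0 h2 h8' h0' hpos
      · -- H > 17, A > 8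
        obtain ⟨e1, m1⟩ := ih (H - 17) (A + 7) d (by omega) hd
        obtain ⟨e2, m2⟩ := ih (H - 2) (A - 8) _ (by omega) m1
        have hv : max (solveA n (H - 17) (A + 7) d).1
            (solveA n (H - 2) (A - 8) (solveA n (H - 17) (A + 7) d).2).1 + 2 = fPure H A := by
          rw [e1, e2]
          conv_rhs => rw [fPure]
          rw [if_pos h17, if_pos h8]
        exact ⟨hv, memoOK_insert m2 (H, A) _ hv⟩
      · -- H > 17, 0 < A ≤ 8
        obtain ⟨e1, m1⟩ := ih (H - 17) (A + 7) d (by omega) hd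
        have hv : (solveA n (H - 17) (A + 7) d).1 + 2 = fPure H A := by
          rw [e1]
          conv_rhs => rw [fPure]
          split_ifs <;> omega
        exact ⟨hv, memoOK_insert m1 (H, A) _ hv⟩
      · -- H > 17, A ≤ 0
        have hv : (0 : Int) = fPure H A := by rw [fPure]; split_ifs <;> omega
        exact ⟨hv, memoOK_insert hd (H, A) _ hv⟩
      · -- 2 < H ≤ 17, A > 8
        obtain ⟨e, m⟩ := ih (H - 2) (A - 8) d (by omega) hd
        have hv : (solveA n (H - 2) (A - 8) d).1 + 2 = fPure H A := by
          rw [e]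
          conv_rhs => rw [fPure]
          split_ifs <;> omega
        exact ⟨hv, memoOK_insert m (H, A) _ hv⟩
      · have hv : (1 : Int) = fPure H A := by rw [fPure]; split_ifs <;> omega
        exact ⟨hv, memoOK_insert hd (H, A) _ hv⟩
      · have hv : (0 : Int) = fPure H A := by rw [fPure]; split_ifs <;> omega
        exact ⟨hv, memoOK_insert hd (H, A) _ hv⟩
      · have hv : (1 : Int) = fPure H A := by rw [fPure]; split_ifs <;> omega
        exact ⟨hv, memoOK_insert hd (H, A) _ hv⟩
      · have hv : (0 : Int) = fPure H A := by rw [fPure]; split_ifs <;> omega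
        exact ⟨hv, memoOK_insert hd (H, A) _ hv⟩

theorem memoOK_empty : MemoOK PySem.Dict.empty := by
  intro p v hv
  simp [PySem.Dict.get?_empty] at hv

-- ===== VERDICT (by name: the statement is the Claim_ definition above) =====
theorem solve_spec : Claim_equal_solve := by
  intro H A _hdom _hpre
  unfold Spec_solve solve solve_alt
  rw [(solveA_eq (H.toNat + 1) H A PySem.Dict.empty (by omega) memoOK_empty).1,
      solveLoop_eq (H.toNat + 1) H A 0 (by omega)]
  omega
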